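-- pv_equiv track=rewrite | github.com/ChocolateXmas/Python-Proj | Projects/Mathematical/Histogram/histogram.py | draw_histogram
-- ===== SOURCE A (Python) =====
-- alphaBet = [chr(i + 97) for i in range(26)]
--
-- def draw_histogram(count_list):
--     graph = ' '.join(char for char in alphaBet)
--     line = ""
--     for i in range(0, max(count_list)):
--         for c in range(0, len(count_list)):
--             if count_list[c] != 0:
--                 line += "^ "
--                 count_list[c] -= 1
--             else:
--                 line += "  "
--         graph = line + "\n" + graph
--         line = ""
--     return graph
-- ===== SOURCE B (Python) =====
-- alphaBet = [chr(i + 97) for i in range(26)]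
--
-- def draw_histogram(count_list):
--     # Builds a per-column cell table first, then renders rows top-down with one join.
--     # Unlike A, this does not mutate count_list (return value is identical).
--     M = max(count_list)
--     cols = []
--     for v in count_list:
--         cells = []
--         for _ in range(M):
--             if v != 0:
--                 cells.append("^ ")
--                 v -= 1
--             else:
--                 cells.append("  ")
--         cols.append(cells)
--     rows = [''.join(col[i] for col in cols) for i in range(M - 1, -1, -1)]
--     return '\n'.join(rows + [' '.join(alphaBet)])
-- ===== Notes on version B (the rewrite author's own statement) =====
-- stated objective: faster
-- what changed: A builds the picture row-major, rescanning and destructively decrementing count_list and prepending each finished row to the whole accumulated string (quadratic copying); B simulates each column once into a per-column cell table, transposes it top-down and renders everything with a single join (and does not mutate its argument).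
-- outside the precondition, e.g. on draw_histogram([]): A raises ValueError, B raises ValueError
import Mathlib
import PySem

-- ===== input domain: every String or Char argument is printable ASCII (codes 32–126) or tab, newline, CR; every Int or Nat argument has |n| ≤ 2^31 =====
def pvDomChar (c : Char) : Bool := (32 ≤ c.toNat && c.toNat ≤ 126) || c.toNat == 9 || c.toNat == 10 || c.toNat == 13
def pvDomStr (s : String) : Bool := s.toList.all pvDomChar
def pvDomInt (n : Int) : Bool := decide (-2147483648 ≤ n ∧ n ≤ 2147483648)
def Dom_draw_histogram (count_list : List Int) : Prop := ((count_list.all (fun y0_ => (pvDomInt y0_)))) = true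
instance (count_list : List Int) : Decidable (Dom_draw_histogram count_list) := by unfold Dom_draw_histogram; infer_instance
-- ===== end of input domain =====

-- B replaces A's row-major mutate-and-prepend loop by a per-column cell table that is then
-- transposed top-down and rendered with a single join; equivalence is about the RETURN value
-- only (A destructively decrements count_list, B leaves it untouched).

-- ===== PORT A =====
def pvAlphaBet : List String := (List.range 26).map (fun i => (Char.ofNat (i + 97)).toString)

def draw_histogram (count_list : List Int) : String :=
  let graph := PySem.Str.join " " pvAlphaBet
  let M := ((PySem.List.max? count_list (fun x => x)).getD 0)
  let res := (PySem.List.pyRange 0 M 1).foldl (fun (st : List Int × String) _i =>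
      let inner := (PySem.List.pyRange 0 (st.1.length : Int) 1).foldl
        (fun (st2 : List Int × String) c =>
          if PySem.List.pyGetD st2.1 c 0 ≠ 0 then
            (PySem.List.pySetD st2.1 c (PySem.List.pyGetD st2.1 c 0 - 1), st2.2 ++ "^ ")
          else (st2.1, st2.2 ++ "  "))
        (st.1, "")
      (inner.1, inner.2 ++ "\n" ++ st.2)) (count_list, graph)
  res.2

-- ===== PORT B =====
def pvColCells (v : Int) : Nat → List String
  | 0 => []
  | m + 1 => if v ≠ 0 then "^ " :: pvColCells (v - 1) m else "  " :: pvColCells v m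

def draw_histogram_alt (count_list : List Int) : String :=
  let M := ((PySem.List.max? count_list (fun x => x)).getD 0).toNat
  let cols := count_list.map (fun v => pvColCells v M)
  let rows := (List.range M).reverse.map
      (fun i => PySem.Str.join "" (cols.map (fun col => col.getD i "")))
  PySem.Str.join "\n" (rows ++ [PySem.Str.join " " pvAlphaBet])

-- ===== PRECONDITION & SPEC =====
-- Pre_ excludes only the empty list, on which Python's max([]) raises ValueError in both A and B.
def Pre_draw_histogram (count_list : List Int) : Prop := count_list ≠ []
instance (count_list : List Int) : Decidable (Pre_draw_histogram count_list) := by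
  unfold Pre_draw_histogram; infer_instance
def pvWitness_draw_histogram : List Int := [1, 0, 2]

def Spec_draw_histogram (count_list : List Int) (out : String) : Prop := out = draw_histogram_alt count_list
instance (count_list : List Int) (out : String) : Decidable (Spec_draw_histogram count_list out) := by unfold Spec_draw_histogram; infer_instance

-- ===== CLAIM (what is proved, stated in full; the proofs are below) =====
def Claim_equal_draw_histogram : Prop := ∀ (count_list : List Int), Dom_draw_histogram count_list → Pre_draw_histogram count_list → Spec_draw_histogram count_list (draw_histogram count_list)

-- ===== LEMMAS AND PROOFS =====


-- proof-side helpers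
def pvMark (v : Int) : String := if v ≠ 0 then "^ " else "  "
def pvDec (v : Int) : Int := if v ≠ 0 then v - 1 else v
def pvRow (cl : List Int) : String := PySem.Str.join "" (cl.map pvMark)
def pvIter : Nat → List Int → String → String
  | 0, _, g => g
  | n + 1, cl, g => pvIter n (cl.map pvDec) (pvRow cl ++ "\n" ++ g)

lemma pv_join_cons_ne (sep x : String) (xs : List String) (h : xs ≠ []) :
    PySem.Str.join sep (x :: xs) = x ++ sep ++ PySem.Str.join sep xs := by
  obtain ⟨y, ys, rfl⟩ := List.exists_cons_of_ne_nil h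
  simp [PySem.Str.join, PySem.Chars.join_cons_cons, String.ofList_append]
  rw [String.append_assoc]

lemma pv_join_nil (sep : String) : PySem.Str.join sep [] = "" := by
  simp [PySem.Str.join, PySem.Chars.join_nil]

lemma pv_join_singleton (sep x : String) : PySem.Str.join sep [x] = x := by
  simp [PySem.Str.join, PySem.Chars.join_singleton]

lemma pv_row_cons (v : Int) (t : List Int) : pvRow (v :: t) = pvMark v ++ pvRow t := by
  unfold pvRow
  rcases t with _ | ⟨w, t⟩
  · simp [pv_join_singleton, pv_join_nil]
  · rw [List.map_cons, pv_join_cons_ne _ _ _ (by simp)]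
    simp

lemma pv_inner_gen (cl : List Int) : ∀ (pre : List Int) (line : String),
    ((List.range cl.length).map (fun k => ((pre.length + k : Nat) : Int))).foldl
      (fun (st2 : List Int × String) c =>
        if PySem.List.pyGetD st2.1 c 0 ≠ 0 then
          (PySem.List.pySetD st2.1 c (PySem.List.pyGetD st2.1 c 0 - 1), st2.2 ++ "^ ")
        else (st2.1, st2.2 ++ "  ")) (pre ++ cl, line)
    = (pre ++ cl.map pvDec, line ++ pvRow cl) := by
  induction cl with
  | nil =>
    intro pre line
    simp [pvRow, pv_join_nil]
  | cons v t ih =>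
    intro pre line
    simp only [List.length_cons]
    rw [List.range_succ_eq_map]
    simp only [List.map_cons, List.foldl_cons, List.map_map]
    have hget : PySem.List.pyGetD (pre ++ v :: t) ((pre.length + 0 : Nat) : Int) 0 = v := by
      rw [PySem.List.pyGetD_natCast, Nat.add_zero, List.getD_append_right _ _ _ _ le_rfl]
      simp
    have hset : PySem.List.pySetD (pre ++ v :: t) ((pre.length + 0 : Nat) : Int) (v - 1)
        = pre ++ (v - 1) :: t := by
      rw [PySem.List.pySetD_natCast, Nat.add_zero, List.set_append_right _ _ le_rfl]
      simp
    have hstep :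
        (if PySem.List.pyGetD (pre ++ v :: t) ((pre.length + 0 : Nat) : Int) 0 ≠ 0 then
          (PySem.List.pySetD (pre ++ v :: t) ((pre.length + 0 : Nat) : Int)
            (PySem.List.pyGetD (pre ++ v :: t) ((pre.length + 0 : Nat) : Int) 0 - 1),
            line ++ "^ ")
         else (pre ++ v :: t, line ++ "  "))
        = (pre ++ pvDec v :: t, line ++ pvMark v) := by
      rw [hget]
      by_cases hv : v = 0
      · simp [hv, pvDec, pvMark]
      · rw [if_pos hv, hset]
        simp [pvDec, pvMark, hv]
    rw [hstep]
    have hmapfun : ((fun k : Nat => ((pre.length + k : Nat) : Int)) ∘ Nat.succ)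
        = fun k : Nat => (((pre ++ [pvDec v]).length + k : Nat) : Int) := by
      funext k
      simp [Function.comp_apply, List.length_append]
      omega
    rw [hmapfun]
    have := ih (pre ++ [pvDec v]) (line ++ pvMark v)
    rw [List.append_assoc] at this
    simp only [List.singleton_append] at this
    rw [this]
    simp [pv_row_cons, String.append_assoc, List.append_assoc]

lemma pv_inner (cl : List Int) (line : String) :
    (PySem.List.pyRange 0 (cl.length : Nat) 1).foldl
      (fun (st2 : List Int × String) c =>
        if PySem.List.pyGetD st2.1 c 0 ≠ 0 then
          (PySem.List.pySetD st2.1 c (PySem.List.pyGetD st2.1 c 0 - 1), st2.2 ++ "^ ")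
        else (st2.1, st2.2 ++ "  ")) (cl, line)
    = (cl.map pvDec, line ++ pvRow cl) := by
  have h := pv_inner_gen cl [] line
  simp only [List.nil_append, List.length_nil] at h
  rw [PySem.List.pyRange_one]
  have : (fun k : Nat => ((0 : Int) + k)) = fun k : Nat => ((0 + k : Nat) : Int) := by
    funext k; simp
  simp only [Int.sub_zero, Int.toNat_natCast]
  rw [this]
  exact h

lemma pv_foldl_ignore {α β : Type} (g : α → α) (l : List β) : ∀ (s : α),
    l.foldl (fun s _ => g s) s = g^[l.length] s := by
  induction l with
  | nil => intro s; simp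
  | cons b t ih =>
    intro s
    simp only [List.foldl_cons, List.length_cons]
    rw [Function.iterate_succ_apply]
    exact ih (g s)

lemma pv_iterate (n : Nat) : ∀ (cl : List Int) (g : String),
    ((fun (st : List Int × String) => (st.1.map pvDec, pvRow st.1 ++ "\n" ++ st.2))^[n] (cl, g)).2
    = pvIter n cl g := by
  induction n with
  | zero => intro cl g; simp [pvIter]
  | succ n ih =>
    intro cl g
    rw [Function.iterate_succ_apply]
    exact ih _ _

lemma pv_col_step (v : Int) (n : Nat) :
    pvColCells v (n + 1) = if v ≠ 0 then "^ " :: pvColCells (v - 1) n else "  " :: pvColCells v n :=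
  rfl

lemma pv_col_zero (v : Int) (n : Nat) : (pvColCells v (n + 1)).getD 0 "" = pvMark v := by
  rw [pv_col_step]
  unfold pvMark
  by_cases hv : v = 0 <;> simp [hv]

lemma pv_col_succ (v : Int) (n i : Nat) :
    (pvColCells v (n + 1)).getD (i + 1) "" = (pvColCells (pvDec v) n).getD i "" := by
  rw [pv_col_step]
  unfold pvDec
  by_cases hv : v = 0 <;> simp [hv]

lemma pv_join_snoc : ∀ (xs : List String) (a : String),
    PySem.Str.join "\n" (xs ++ [a]) = xs.foldr (fun x acc => x ++ "\n" ++ acc) a := by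
  intro xs
  induction xs with
  | nil => intro a; simp [pv_join_singleton]
  | cons x t ih =>
    intro a
    rw [List.cons_append, pv_join_cons_ne _ _ _ (by simp), ih]
    simp [String.append_assoc]

lemma pv_rows (n : Nat) : ∀ (cl : List Int) (g : String),
    (((List.range n).reverse.map (fun i =>
        PySem.Str.join "" ((cl.map (fun v => pvColCells v n)).map (fun col => col.getD i "")))).foldr
      (fun x acc => x ++ "\n" ++ acc) g)
    = pvIter n cl g := by
  induction n with
  | zero => intro cl g; simp [pvIter]
  | succ n ih =>
    intro cl g
    rw [List.range_succ_eq_map]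
    simp only [List.reverse_cons, List.map_append, List.map_cons, List.map_nil,
      List.foldr_append, List.foldr_cons, List.foldr_nil, ← List.map_reverse, List.map_map]
    have hzero : PySem.Str.join ""
        (cl.map ((fun col => col.getD 0 "") ∘ fun v => pvColCells v (n + 1)))
        = pvRow cl := by
      unfold pvRow
      congr 1
      exact List.map_congr_left (fun v _ => pv_col_zero v n)
    have hsucc : ((fun i => PySem.Str.join ""
          (cl.map ((fun col => col.getD i "") ∘ fun v => pvColCells v (n + 1)))) ∘ Nat.succ)
        = fun i => PySem.Str.join ""
          (((cl.map pvDec).map (fun v => pvColCells v n)).map (fun col => col.getD i "")) := by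
      funext i
      simp only [Function.comp_apply, List.map_map]
      congr 1
      exact List.map_congr_left (fun v _ => pv_col_succ v n i)
    rw [hzero, hsucc, ih]
    rfl

-- ===== VERDICT (by name: the statement is the Claim_ definition above) =====
theorem draw_histogram_spec : Claim_equal_draw_histogram := by
  intro cl _ _
  unfold Spec_draw_histogram
  simp only [draw_histogram, draw_histogram_alt]
  have hfun : (fun (st : List Int × String) (_i : Int) =>
      (((PySem.List.pyRange 0 (st.1.length : Nat) 1).foldl
        (fun (st2 : List Int × String) c =>
          if PySem.List.pyGetD st2.1 c 0 ≠ 0 then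
            (PySem.List.pySetD st2.1 c (PySem.List.pyGetD st2.1 c 0 - 1), st2.2 ++ "^ ")
          else (st2.1, st2.2 ++ "  ")) (st.1, "")).1,
       ((PySem.List.pyRange 0 (st.1.length : Nat) 1).foldl
        (fun (st2 : List Int × String) c =>
          if PySem.List.pyGetD st2.1 c 0 ≠ 0 then
            (PySem.List.pySetD st2.1 c (PySem.List.pyGetD st2.1 c 0 - 1), st2.2 ++ "^ ")
          else (st2.1, st2.2 ++ "  ")) (st.1, "")).2 ++ "\n" ++ st.2))
      = fun (st : List Int × String) (_i : Int) =>
        (st.1.map pvDec, pvRow st.1 ++ "\n" ++ st.2) := by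
    funext st _i
    rw [pv_inner st.1 ""]
    simp [String.empty_append]
  rw [hfun, pv_foldl_ignore, PySem.List.length_pyRange_one, pv_join_snoc, pv_rows,
    pv_iterate]
  simp
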